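-- pv_equiv track=rewrite | github.com/dsivakumar81/strantas-quanta | apps/api/quanta_api/services/normalizer.py | _resolve_text
-- ===== SOURCE A (Python) =====
-- def _resolve_text(values: list[str | None], field_name: str, warnings: list[str]) -> str | None:
--     normalized = [value.strip() for value in values if value]
--     if not normalized:
--         return None
--     unique_values = sorted(set(normalized))
--     if len(unique_values) > 1:
--         warnings.append(f"{field_name} conflict resolved using first extracted value '{unique_values[0]}'")
--     return unique_values[0]
-- ===== SOURCE B (Python) =====
-- def _resolve_text(values: list[str | None], field_name: str, warnings: list[str]) -> str | None:
--     normalized = [value.strip() for value in values if value]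
--     if not normalized:
--         return None
--     first = normalized[0]
--     minimum = first
--     conflict = False
--     for v in normalized[1:]:
--         if v < minimum:
--             minimum = v
--         if v != first:
--             conflict = True
--     if conflict:
--         warnings.append(f"{field_name} conflict resolved using first extracted value '{minimum}'")
--     return minimum
-- ===== Notes on version B (the rewrite author's own statement) =====
-- stated objective: simpler
-- what changed: Replaces sorted(set(normalized)) with a single linear pass that tracks the running minimum and a conflict flag (any value differing from the first), removing the set and the sort.
import Mathlib
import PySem

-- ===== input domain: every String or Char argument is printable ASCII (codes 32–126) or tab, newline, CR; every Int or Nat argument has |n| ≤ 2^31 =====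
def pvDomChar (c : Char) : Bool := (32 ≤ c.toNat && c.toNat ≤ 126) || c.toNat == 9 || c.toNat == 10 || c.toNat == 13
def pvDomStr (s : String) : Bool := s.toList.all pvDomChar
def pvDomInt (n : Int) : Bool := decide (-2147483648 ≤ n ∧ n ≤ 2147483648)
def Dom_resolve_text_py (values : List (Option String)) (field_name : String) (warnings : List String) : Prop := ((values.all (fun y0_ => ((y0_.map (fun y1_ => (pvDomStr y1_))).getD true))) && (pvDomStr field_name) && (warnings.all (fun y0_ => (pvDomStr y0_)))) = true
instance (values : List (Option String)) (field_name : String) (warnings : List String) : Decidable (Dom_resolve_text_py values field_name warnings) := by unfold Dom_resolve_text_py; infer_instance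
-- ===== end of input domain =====

-- B replaces sorted(set(...)) by a single pass tracking the running minimum and a conflict flag
-- (simpler, no set/sort). Both Pythons append the identical warning to `warnings`; the equivalence
-- proved here is about the RETURN value only (the mutation of `warnings` is the same in A and B).

-- ===== PORT A =====
def resolve_text_py (values : List (Option String)) (field_name : String) (warnings : List String) : Option String :=
  let normalized := values.filterMap (fun value => match value with
    | none => none
    | some s => if s = "" then none else some (PySem.Str.strip s))
  if normalized = [] then none
  else
    let unique_values := PySem.List.sorted (PySem.Set.ofList normalized) (fun x => x) false
    -- warning appended to `warnings` when unique_values.length > 1 (side effect; return unaffected)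
    unique_values.head?

-- ===== PORT B =====
def resolve_text_py_alt (values : List (Option String)) (field_name : String) (warnings : List String) : Option String :=
  let normalized := values.filterMap (fun value => match value with
    | none => none
    | some s => if s = "" then none else some (PySem.Str.strip s))
  match normalized with
  | [] => none
  | first :: rest =>
    -- loop state (minimum, conflict); warning appended iff conflict (side effect; return unaffected)
    some ((rest.foldl (fun st v =>
        (if v < st.1 then v else st.1, if v ≠ first then true else st.2)) (first, false)).1)

-- ===== PRECONDITION & SPEC =====
def Spec_resolve_text_py (values : List (Option String)) (field_name : String) (warnings : List String) (out : Option String) : Prop := out = resolve_text_py_alt values field_name warnings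
instance (values : List (Option String)) (field_name : String) (warnings : List String) (out : Option String) : Decidable (Spec_resolve_text_py values field_name warnings out) := by unfold Spec_resolve_text_py; infer_instance

-- ===== CLAIM (what is proved, stated in full; the proofs are below) =====
def Claim_equal_resolve_text_py : Prop := ∀ (values : List (Option String)) (field_name : String) (warnings : List String), Dom_resolve_text_py values field_name warnings → Spec_resolve_text_py values field_name warnings (resolve_text_py values field_name warnings)

-- ===== LEMMAS AND PROOFS =====

-- B's loop's first component is the running minimum, for any initial conflict flag.
theorem pv_fold_fst (first : String) (rest : List String) :
    ∀ (m : String) (b : Bool),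
      (rest.foldl (fun st v =>
          (if v < st.1 then v else st.1, if v ≠ first then true else st.2)) (m, b)).1
        = rest.foldl min m := by
  induction rest with
  | nil => intro m b; rfl
  | cons v t ih =>
    intro m b
    simp only [List.foldl_cons]
    rw [ih]
    congr 1
    rcases lt_or_ge v m with h | h
    · simp [h, min_eq_right (le_of_lt h)]
    · simp [not_lt.mpr h, min_eq_left h]

-- head of sorted(set(l)) = running minimum of l, for nonempty l.
theorem pv_sorted_set_head (x : String) (t : List String) :
    (PySem.List.sorted (PySem.Set.ofList (x :: t)) (fun y => y) false).head?
      = some (t.foldl min x) := by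
  have hmin : PySem.List.min? (x :: t) (fun y => y) = some (t.foldl min x) :=
    PySem.List.min?_id_cons x t
  have hm_mem : t.foldl min x ∈ (x :: t) := PySem.List.min?_mem hmin
  have hm_min : ∀ y ∈ (x :: t), t.foldl min x ≤ y := by
    intro y hy; exact PySem.List.min?_isMin hmin y hy
  have hne : PySem.List.sorted (PySem.Set.ofList (x :: t)) (fun y => y) false ≠ [] := by
    intro h
    rw [PySem.List.sorted_eq_nil_iff] at h
    have : x ∈ PySem.Set.ofList (x :: t) := (PySem.Set.mem_ofList _ _).mpr (by simp)
    rw [h] at this; exact absurd this (List.not_mem_nil)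
  obtain ⟨h, s, hs⟩ := List.exists_cons_of_ne_nil hne
  have hh : ∀ y ∈ PySem.Set.ofList (x :: t), h ≤ y :=
    PySem.List.key_head_sorted_le _ _ hs
  have hh_mem : h ∈ (x :: t) := by
    have : h ∈ PySem.List.sorted (PySem.Set.ofList (x :: t)) (fun y => y) false := by
      rw [hs]; exact List.mem_cons_self
    exact (PySem.Set.mem_ofList _ _).mp ((PySem.List.mem_sorted _ _ _ _).mp this)
  have h1 : h ≤ t.foldl min x := hh _ ((PySem.Set.mem_ofList _ _).mpr hm_mem)
  have h2 : t.foldl min x ≤ h := hm_min _ hh_mem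
  rw [hs]
  simp [le_antisymm h2 h1]

-- ===== VERDICT (by name: the statement is the Claim_ definition above) =====
theorem resolve_text_py_spec : Claim_equal_resolve_text_py := by
  intro values field_name warnings _
  unfold Spec_resolve_text_py resolve_text_py resolve_text_py_alt
  cases hN : values.filterMap (fun value => match value with
    | none => none
    | some s => if s = "" then none else some (PySem.Str.strip s)) with
  | nil => simp
  | cons x t =>
    simp only [if_neg (List.cons_ne_nil x t)]
    rw [pv_fold_fst, pv_sorted_set_head]
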